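-- pv_equiv track=rewrite | github.com/leonydew/BIG_DATA_LABS | big_data_lab2/matrix_mapreduce.py | reducer_matrix
-- ===== SOURCE A (Python) =====
-- from collections import defaultdict
--
-- def reducer_matrix(mapped):
--     """
--     Группирует значения по ключу (i, j) и считает сумму произведений
--     """
--     grouped = defaultdict(list)
--
--     for key, value in mapped:
--         grouped[key].append(value)
--
--     result = {}
--
--     for key, values in grouped.items():
--         A_vals = {}
--         B_vals = {}
--         total = 0
--
--         for tag, k, val in values:
--             if tag == "A":
--                 A_vals[k] = val
--             elif tag == "B":
--                 B_vals[k] = val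
--
--         for k in A_vals:
--             if k in B_vals:
--                 total += A_vals[k] * B_vals[k]
--
--         result[key] = total
--
--     return result
-- ===== SOURCE B (Python) =====
-- def reducer_matrix(mapped):
--     """
--     Sort-merge join instead of a hash join: keep the last value per composite
--     (key, k) on each tag side, sort both sides by composite key, then combine
--     matching composites with a two-pointer merge.
--     """
--     result = {}
--     da = {}
--     db = {}
--     for key, (tag, k, val) in mapped:
--         if key not in result:
--             result[key] = 0
--         if tag == "A":
--             da[(key, k)] = val
--         elif tag == "B":
--             db[(key, k)] = val
--
--     alist = sorted(da.items(), key=lambda p: p[0])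
--     blist = sorted(db.items(), key=lambda p: p[0])
--
--     i = j = 0
--     while i < len(alist) and j < len(blist):
--         (ca, va), (cb, vb) = alist[i], blist[j]
--         if ca < cb:
--             i += 1
--         elif cb < ca:
--             j += 1
--         else:
--             result[ca[0]] += va * vb
--             i += 1
--             j += 1
--     return result
-- ===== Notes on version B (the rewrite author's own statement) =====
-- stated objective: alternative
-- what changed: Replaces A's hash join (per-key dicts probed by membership) with a sort-merge join: last values per composite (key, index) are collected per tag, both sides are sorted by composite key, and matching composites are combined by a two-pointer merge.
import Mathlib
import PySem

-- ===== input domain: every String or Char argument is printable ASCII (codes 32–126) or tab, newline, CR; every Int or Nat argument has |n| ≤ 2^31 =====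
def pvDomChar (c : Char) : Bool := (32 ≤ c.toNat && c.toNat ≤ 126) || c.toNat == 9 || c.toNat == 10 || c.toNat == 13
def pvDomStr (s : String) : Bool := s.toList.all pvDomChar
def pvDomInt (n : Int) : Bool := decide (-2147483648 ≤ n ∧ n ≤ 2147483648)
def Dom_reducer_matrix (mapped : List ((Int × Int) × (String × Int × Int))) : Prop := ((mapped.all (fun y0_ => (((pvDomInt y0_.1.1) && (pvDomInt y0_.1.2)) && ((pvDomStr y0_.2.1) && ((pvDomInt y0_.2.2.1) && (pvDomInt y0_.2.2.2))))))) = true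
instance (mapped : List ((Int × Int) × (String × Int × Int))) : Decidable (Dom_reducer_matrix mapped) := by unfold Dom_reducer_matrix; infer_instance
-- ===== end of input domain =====

-- B replaces A's hash join (per-key dicts probed by membership) with a sort-merge join:
-- last values per composite (key, index) are collected per tag, both sides are sorted by
-- composite key, and matching composites are combined by a two-pointer merge.

-- ===== PORT A =====
-- literal port: group values per key, then per key split into A_vals/B_vals and sum products
def reducer_matrix (mapped : List ((Int × Int) × (String × Int × Int))) : List (Int × Int × Int) :=
  let grouped : PySem.Dict (Int × Int) (List (String × Int × Int)) :=
    mapped.foldl (fun g p => g.modify p.1 [] (fun vs => vs ++ [p.2])) PySem.Dict.empty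
  let result : PySem.Dict (Int × Int) Int :=
    grouped.items.foldl (fun r kv =>
      let ab : PySem.Dict Int Int × PySem.Dict Int Int :=
        kv.2.foldl (fun ab v =>
          if v.1 == "A" then (ab.1.insert v.2.1 v.2.2, ab.2)
          else if v.1 == "B" then (ab.1, ab.2.insert v.2.1 v.2.2)
          else ab) (PySem.Dict.empty, PySem.Dict.empty)
      -- 'for k in A_vals: if k in B_vals: total += A_vals[k]*B_vals[k]'; A_vals[k] always
      -- present while iterating A_vals' keys, so getD is exact here
      let total : Int :=
        ab.1.keys.foldl (fun t k =>
          if ab.2.contains k then t + ab.1.getD k 0 * ab.2.getD k 0 else t) 0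
      r.insert kv.1 total) PySem.Dict.empty
  result.items.map (fun p => (p.1.1, p.1.2, p.2))

-- ===== PORT B =====
-- Python compares the composite tuples ((i, j), k) lexicographically; exact as the lex
-- triple of their Int components
def pvLexKey (c : (Int × Int) × Int) : Int ×ₗ Int ×ₗ Int := toLex (c.1.1, toLex (c.1.2, c.2))

-- the two-pointer 'while i < len(alist) and j < len(blist)' loop of Source B: advancing a
-- pointer is dropping the head of that (already materialised) list; 'result[ca[0]] += va*vb'
-- is modify with default 0, exact since ca[0] is always already a key of result
def pvMergeLoop : List (((Int × Int) × Int) × Int) → List (((Int × Int) × Int) × Int) →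
    PySem.Dict (Int × Int) Int → PySem.Dict (Int × Int) Int
  | (ca, va) :: ta, (cb, vb) :: tb, r =>
      if pvLexKey ca < pvLexKey cb then pvMergeLoop ta ((cb, vb) :: tb) r
      else if pvLexKey cb < pvLexKey ca then pvMergeLoop ((ca, va) :: ta) tb r
      else pvMergeLoop ta tb (r.modify ca.1 0 (fun t => t + va * vb))
  | _, _, r => r
termination_by al bl _ => al.length + bl.length
decreasing_by all_goals (simp only [List.length_cons]; omega)

-- literal port of Source B: one pass filling result-with-0s / da / db, sort both item lists
-- by composite key, then the two-pointer merge
def reducer_matrix_alt (mapped : List ((Int × Int) × (String × Int × Int))) : List (Int × Int × Int) :=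
  let st : PySem.Dict (Int × Int) Int × PySem.Dict ((Int × Int) × Int) Int × PySem.Dict ((Int × Int) × Int) Int :=
    mapped.foldl (fun st p =>
      let r := if st.1.contains p.1 then st.1 else st.1.insert p.1 0
      if p.2.1 == "A" then (r, st.2.1.insert (p.1, p.2.2.1) p.2.2.2, st.2.2)
      else if p.2.1 == "B" then (r, st.2.1, st.2.2.insert (p.1, p.2.2.1) p.2.2.2)
      else (r, st.2.1, st.2.2)) (PySem.Dict.empty, PySem.Dict.empty, PySem.Dict.empty)
  let alist := PySem.List.sorted st.2.1.items (fun q => pvLexKey q.1) false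
  let blist := PySem.List.sorted st.2.2.items (fun q => pvLexKey q.1) false
  let result := pvMergeLoop alist blist st.1
  result.items.map (fun p => (p.1.1, p.1.2, p.2))

-- ===== PRECONDITION & SPEC =====
def Spec_reducer_matrix (mapped : List ((Int × Int) × (String × Int × Int))) (out : List (Int × Int × Int)) : Prop := out = reducer_matrix_alt mapped
instance (mapped : List ((Int × Int) × (String × Int × Int))) (out : List (Int × Int × Int)) : Decidable (Spec_reducer_matrix mapped out) := by unfold Spec_reducer_matrix; infer_instance

-- ===== CLAIM (what is proved, stated in full; the proofs are below) =====
def Claim_equal_reducer_matrix : Prop := ∀ (mapped : List ((Int × Int) × (String × Int × Int))), Dom_reducer_matrix mapped → Spec_reducer_matrix mapped (reducer_matrix mapped)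

-- ===== LEMMAS AND PROOFS =====

-- named forms of the loop bodies of both ports (proof-side only)
def pvStK (d : PySem.Dict (Int × Int) Int) (p : (Int × Int) × (String × Int × Int)) : PySem.Dict (Int × Int) Int :=
  if d.contains p.1 then d else d.insert p.1 0
def pvStA (d : PySem.Dict ((Int × Int) × Int) Int) (p : (Int × Int) × (String × Int × Int)) : PySem.Dict ((Int × Int) × Int) Int :=
  if p.2.1 == "A" then d.insert (p.1, p.2.2.1) p.2.2.2 else d
def pvStB (d : PySem.Dict ((Int × Int) × Int) Int) (p : (Int × Int) × (String × Int × Int)) : PySem.Dict ((Int × Int) × Int) Int :=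
  if p.2.1 == "B" then d.insert (p.1, p.2.2.1) p.2.2.2 else d
def pvPA (d : PySem.Dict Int Int) (v : String × Int × Int) : PySem.Dict Int Int :=
  if v.1 == "A" then d.insert v.2.1 v.2.2 else d
def pvPB (d : PySem.Dict Int Int) (v : String × Int × Int) : PySem.Dict Int Int :=
  if v.1 == "B" then d.insert v.2.1 v.2.2 else d
def pvLift (K : Int × Int) (q : Int × Int) : ((Int × Int) × Int) × Int := ((K, q.1), q.2)
def pvTotal (vs : List (String × Int × Int)) : Int :=
  (vs.foldl pvPA PySem.Dict.empty).keys.foldl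
    (fun t k => if (vs.foldl pvPB PySem.Dict.empty).contains k
      then t + (vs.foldl pvPA PySem.Dict.empty).getD k 0 * (vs.foldl pvPB PySem.Dict.empty).getD k 0
      else t) 0

-- first-match association-list lookup (proof-side description of the merge)
def pvFind : List (((Int × Int) × Int) × Int) → ((Int × Int) × Int) → Option Int
  | [], _ => none
  | q :: t, c => if q.1 = c then some q.2 else pvFind t c

lemma pvLexKey_injective : Function.Injective pvLexKey := by
  intro a b h
  unfold pvLexKey at h
  have h1 : ((a.1.1, toLex (a.1.2, a.2)) : Int × (Int ×ₗ Int)) = (b.1.1, toLex (b.1.2, b.2)) :=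
    toLex.injective h
  have h2 := congrArg Prod.fst h1
  have h3 := toLex.injective (congrArg Prod.snd h1)
  obtain ⟨⟨_, _⟩, _⟩ := a; obtain ⟨⟨_, _⟩, _⟩ := b
  simp_all [Prod.ext_iff]

lemma pv_ne_of_key_lt {a b : (Int × Int) × Int} (h : pvLexKey a < pvLexKey b) : b ≠ a := by
  intro he; rw [he] at h; exact lt_irrefl _ h

-- contains equivalence from the filtered-items relation
lemma pv_contains_equiv (K : Int × Int) (k : Int) (Fa : PySem.Dict ((Int × Int) × Int) Int)
    (Av : PySem.Dict Int Int)
    (h : Fa.items.filter (fun p => p.1.1 == K) = Av.items.map (pvLift K)) :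
    Fa.contains (K, k) = Av.contains k := by
  have hiff : (K, k) ∈ Fa.keys ↔ k ∈ Av.keys := by
    simp only [PySem.Dict.keys, List.mem_map]
    constructor
    · rintro ⟨p, hp, hpk⟩
      have hpf : p ∈ Fa.items.filter (fun p => p.1.1 == K) := by
        simp [List.mem_filter, hp, hpk]
      rw [h] at hpf
      rcases List.mem_map.1 hpf with ⟨q, hq, hlq⟩
      refine ⟨q, hq, ?_⟩
      have := congrArg Prod.fst hlq
      simp only [pvLift] at this
      rw [hpk] at this
      exact (Prod.mk.injEq _ _ _ _ ▸ this).2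
    · rintro ⟨q, hq, hqk⟩
      have : pvLift K q ∈ Av.items.map (pvLift K) := List.mem_map_of_mem hq
      rw [← h] at this
      exact ⟨pvLift K q, (List.mem_filter.1 this).1, by simp [pvLift, hqk]⟩
  have h1 := PySem.Dict.contains_iff_mem_keys Fa (K, k)
  have h2 := PySem.Dict.contains_iff_mem_keys Av k
  cases hb : Fa.contains (K, k) <;> cases hb2 : Av.contains k <;> simp_all

-- tag-A insert at the tracked key preserves the filtered-items relation
lemma pv_SA1 (K : Int × Int) (k v : Int) (Fa : PySem.Dict ((Int × Int) × Int) Int)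
    (Av : PySem.Dict Int Int)
    (h : Fa.items.filter (fun p => p.1.1 == K) = Av.items.map (pvLift K)) :
    (Fa.insert (K, k) v).items.filter (fun p => p.1.1 == K) = (Av.insert k v).items.map (pvLift K) := by
  have hc := pv_contains_equiv K k Fa Av h
  by_cases hav : Av.contains k = true
  · rw [PySem.Dict.items_insert_of_contains _ _ (hc.trans hav),
        PySem.Dict.items_insert_of_contains _ _ hav]
    rw [List.filter_map]
    have hfe : Fa.items.filter ((fun p => p.1.1 == K) ∘ (fun p => if (p.1 == (K, k)) = true then ((K, k), v) else p))
        = Fa.items.filter (fun p => p.1.1 == K) := by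
      apply List.filter_congr
      intro p _
      by_cases hpk : (p.1 == (K, k)) = true
      · have : p.1 = (K, k) := by simpa using hpk
        simp [Function.comp, this]
      · simp [Function.comp, hpk]
    rw [hfe, h, List.map_map, List.map_map]
    apply List.map_congr_left
    intro q _
    by_cases hqk : (q.1 == k) = true
    · have : q.1 = k := by simpa using hqk
      simp [Function.comp, pvLift, this]
    · have : ¬ q.1 = k := by simpa using hqk
      simp [Function.comp, pvLift, this]
  · simp only [Bool.not_eq_true] at hav
    rw [PySem.Dict.items_insert_of_not_contains _ _ (hc.trans hav),
        PySem.Dict.items_insert_of_not_contains _ _ hav]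
    rw [List.filter_append, h, List.map_append]
    simp [pvLift]

-- tag-A insert at another key leaves the filtered items unchanged
lemma pv_SA2 (K K' : Int × Int) (k v : Int) (hne : K' ≠ K) (Fa : PySem.Dict ((Int × Int) × Int) Int)
    (Av : PySem.Dict Int Int)
    (h : Fa.items.filter (fun p => p.1.1 == K) = Av.items.map (pvLift K)) :
    (Fa.insert (K', k) v).items.filter (fun p => p.1.1 == K) = Av.items.map (pvLift K) := by
  by_cases hfc : Fa.contains (K', k) = true
  · rw [PySem.Dict.items_insert_of_contains _ _ hfc, List.filter_map]
    have hfe : Fa.items.filter ((fun p => p.1.1 == K) ∘ (fun p => if (p.1 == (K', k)) = true then ((K', k), v) else p))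
        = Fa.items.filter (fun p => p.1.1 == K) := by
      apply List.filter_congr
      intro p _
      by_cases hpk : (p.1 == (K', k)) = true
      · have : p.1 = (K', k) := by simpa using hpk
        simp [Function.comp, this]
      · simp [Function.comp, hpk]
    rw [hfe, h, List.map_map]
    apply List.map_congr_left
    intro q _
    simp only [Function.comp, pvLift]
    have : ¬ ((K, q.1) == (K', k)) = true := by
      simp [Prod.mk.injEq]
      intro hKK
      exact absurd hKK.symm hne
    simp [this]
  · rw [PySem.Dict.items_insert_of_not_contains _ _ (by simpa using hfc), List.filter_append, h]
    simp [hne]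

-- B-side get? relation steps
lemma pv_SB1 (K : Int × Int) (k v : Int) (Fb : PySem.Dict ((Int × Int) × Int) Int)
    (Bv : PySem.Dict Int Int) (h : ∀ k', Fb.get? (K, k') = Bv.get? k') :
    ∀ k', (Fb.insert (K, k) v).get? (K, k') = (Bv.insert k v).get? k' := by
  intro k'
  rw [PySem.Dict.get?_insert, PySem.Dict.get?_insert]
  by_cases hk : k' = k
  · simp [hk]
  · simp [hk, h k', Prod.mk.injEq]

lemma pv_SB2 (K K' : Int × Int) (k v : Int) (hne : K' ≠ K) (Fb : PySem.Dict ((Int × Int) × Int) Int) :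
    ∀ k', (Fb.insert (K', k) v).get? (K, k') = Fb.get? (K, k') := by
  intro k'
  exact PySem.Dict.get?_insert_of_ne _ _ (by simp only [ne_eq, Prod.mk.injEq, not_and]; intro h; exact absurd h.symm hne)

-- the two flat passes, restricted to one key, compute A's per-key dictionaries
lemma pv_core (K : Int × Int) (l : List ((Int × Int) × (String × Int × Int))) :
    ∀ (Fa Fb : PySem.Dict ((Int × Int) × Int) Int) (Av Bv : PySem.Dict Int Int),
    Fa.items.filter (fun p => p.1.1 == K) = Av.items.map (pvLift K) →
    (∀ k, Fb.get? (K, k) = Bv.get? k) →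
    (l.foldl pvStA Fa).items.filter (fun p => p.1.1 == K)
        = (((l.filter (fun p => p.1 == K)).map (fun p => p.2)).foldl pvPA Av).items.map (pvLift K)
    ∧ ∀ k, (l.foldl pvStB Fb).get? (K, k)
        = (((l.filter (fun p => p.1 == K)).map (fun p => p.2)).foldl pvPB Bv).get? k := by
  induction l with
  | nil => intro Fa Fb Av Bv hA hB; exact ⟨hA, hB⟩
  | cons p rest ih =>
    intro Fa Fb Av Bv hA hB
    obtain ⟨pk, tag, k, v⟩ := p
    by_cases hk : pk = K
    · subst hk
      simp only [List.foldl_cons, List.filter_cons, beq_self_eq_true, if_pos, List.map_cons]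
      apply ih
      · show (pvStA Fa _).items.filter _ = (pvPA Av _).items.map _
        unfold pvStA pvPA
        by_cases hA' : (tag == "A") = true
        · simpa [hA'] using pv_SA1 pk k v Fa Av hA
        · simpa [hA'] using hA
      · show ∀ k', (pvStB Fb _).get? (pk, k') = (pvPB Bv _).get? k'
        unfold pvStB pvPB
        by_cases hB' : (tag == "B") = true
        · simpa [hB'] using pv_SB1 pk k v Fb Bv hB
        · simpa [hB'] using hB
    · have hkb : (((pk, tag, k, v) : ((Int × Int) × (String × Int × Int))).1 == K) = false := by simpa using hk
      simp only [List.foldl_cons, List.filter_cons, hkb, Bool.false_eq_true, if_neg,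
        not_false_iff]
      apply ih
      · show (pvStA Fa _).items.filter _ = Av.items.map _
        unfold pvStA
        by_cases hA' : (tag == "A") = true
        · simpa [hA'] using pv_SA2 K pk k v hk Fa Av hA
        · simpa [hA'] using hA
      · show ∀ k', (pvStB Fb _).get? (K, k') = Bv.get? k'
        intro k'
        by_cases hB' : (tag == "B") = true
        · rw [show pvStB Fb (pk, tag, k, v) = Fb.insert (pk, k) v by simp [pvStB, hB'],
              pv_SB2 K pk k v hk Fb k']
          exact hB k'
        · simpa [pvStB, hB'] using hB k'

lemma pv_nodup_pvPA (l : List (String × Int × Int)) :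
    ∀ d : PySem.Dict Int Int, d.keys.Nodup → (l.foldl pvPA d).keys.Nodup := by
  induction l with
  | nil => intro d h; exact h
  | cons v rest ih =>
    intro d h
    apply ih
    unfold pvPA
    split
    · exact PySem.Dict.nodup_keys_insert _ _ _ h
    · exact h

lemma pv_sum_filter {α : Type} (l : List α) (p : α → Bool) (f : α → Int) :
    (l.map (fun x => if p x then f x else 0)).sum = ((l.filter p).map f).sum := by
  induction l with
  | nil => rfl
  | cons x rest ih =>
    by_cases hx : p x = true <;> simp [hx, ih]

-- every key in the flat A-pass comes from the input
lemma pv_stA_keys_sub (l : List ((Int × Int) × (String × Int × Int))) :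
    ∀ (d : PySem.Dict ((Int × Int) × Int) Int) (kk : (Int × Int) × Int),
    kk ∈ (l.foldl pvStA d).keys → kk ∈ d.keys ∨ kk.1 ∈ l.map (fun p => p.1) := by
  induction l with
  | nil => intro d kk h; exact Or.inl h
  | cons p rest ih =>
    intro d kk h
    rcases ih _ kk h with hd | hm
    · unfold pvStA at hd
      by_cases hA : (p.2.1 == "A") = true
      · rw [if_pos hA] at hd
        rcases (PySem.Dict.mem_keys_insert _ _ _ _).1 hd with he | hd'
        · exact Or.inr (by simp [he])
        · exact Or.inl hd'
      · rw [if_neg hA] at hd; exact Or.inl hd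
    · exact Or.inr (by simp at hm ⊢; tauto)

-- the flat tag passes keep their keys unique
lemma pv_nodup_stA (l : List ((Int × Int) × (String × Int × Int))) :
    ∀ d : PySem.Dict ((Int × Int) × Int) Int, d.keys.Nodup → (l.foldl pvStA d).keys.Nodup := by
  induction l with
  | nil => intro d h; exact h
  | cons p rest ih =>
    intro d h
    apply ih
    unfold pvStA
    split
    · exact PySem.Dict.nodup_keys_insert _ _ _ h
    · exact h

lemma pv_nodup_stB (l : List ((Int × Int) × (String × Int × Int))) :
    ∀ d : PySem.Dict ((Int × Int) × Int) Int, d.keys.Nodup → (l.foldl pvStB d).keys.Nodup := by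
  induction l with
  | nil => intro d h; exact h
  | cons p rest ih =>
    intro d h
    apply ih
    unfold pvStB
    split
    · exact PySem.Dict.nodup_keys_insert _ _ _ h
    · exact h

-- A's per-key total equals the flat contribution sum for that key
lemma pv_key_total (mapped : List ((Int × Int) × (String × Int × Int))) (K : Int × Int) :
    pvTotal ((mapped.filter (fun p => p.1 == K)).map (fun p => p.2))
      = ((mapped.foldl pvStA PySem.Dict.empty).items.map
          (fun q => if (mapped.foldl pvStB PySem.Dict.empty).contains q.1 && q.1.1 == K
            then q.2 * (mapped.foldl pvStB PySem.Dict.empty).getD q.1 0 else 0)).sum := by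
  obtain ⟨hfA, hfB⟩ := pv_core K mapped PySem.Dict.empty PySem.Dict.empty PySem.Dict.empty PySem.Dict.empty
    (by simp [PySem.Dict.empty]) (by intro k; rfl)
  set Fa := mapped.foldl pvStA PySem.Dict.empty with hFa
  set Fb := mapped.foldl pvStB PySem.Dict.empty with hFb
  set vals := (mapped.filter (fun p => p.1 == K)).map (fun p => p.2) with hvals
  set Av := vals.foldl pvPA PySem.Dict.empty with hAv
  set Bv := vals.foldl pvPB PySem.Dict.empty with hBv
  have hcont : ∀ kk, Fb.contains (K, kk) = Bv.contains kk := by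
    intro kk
    rw [PySem.Dict.contains_eq_isSome_get?, PySem.Dict.contains_eq_isSome_get?, hfB kk]
  have hgetD : ∀ kk, Fb.getD (K, kk) 0 = Bv.getD kk 0 := by
    intro kk
    rw [PySem.Dict.getD_eq_get?_getD, PySem.Dict.getD_eq_get?_getD, hfB kk]
  have h1 : ∀ q : ((Int × Int) × Int) × Int,
      (if Fb.contains q.1 && q.1.1 == K then q.2 * Fb.getD q.1 0 else 0)
        = (if q.1.1 == K then (if Fb.contains q.1 then q.2 * Fb.getD q.1 0 else 0) else 0) := by
    intro q
    by_cases hx : Fb.contains q.1 = true <;> by_cases hy : (q.1.1 == K) = true <;> simp [hx, hy]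
  simp only [h1]
  rw [pv_sum_filter Fa.items (fun q => q.1.1 == K) (fun q => if Fb.contains q.1 then q.2 * Fb.getD q.1 0 else 0)]
  rw [hfA, List.map_map]
  have h2 : ∀ q : Int × Int, ((fun q => if Fb.contains q.1 then q.2 * Fb.getD q.1 0 else 0) ∘ pvLift K) q
      = (if Bv.contains q.1 then q.2 * Bv.getD q.1 0 else 0) := by
    intro q
    simp only [Function.comp, pvLift, hcont q.1, hgetD q.1]
  rw [List.map_congr_left (fun q _ => h2 q)]
  have hitems : Av.items = Av.keys.map (fun k => (k, Av.getD k 0)) :=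
    PySem.Dict.items_eq_map_keys Av (pv_nodup_pvPA vals PySem.Dict.empty (by simp [PySem.Dict.empty])) 0
  rw [hitems, List.map_map]
  unfold pvTotal
  rw [← hAv, ← hBv]
  have h3 : (fun (t : Int) (k : Int) => if Bv.contains k then t + Av.getD k 0 * Bv.getD k 0 else t)
      = (fun t k => t + (if Bv.contains k then Av.getD k 0 * Bv.getD k 0 else 0)) := by
    funext t k
    by_cases hx : Bv.contains k = true <;> simp [hx]
  rw [h3, PySem.List.foldl_add, zero_add]
  apply congrArg
  apply List.map_congr_left
  intro k _
  simp [Function.comp]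

-- pvFind facts
lemma pv_find_cons (q : (((Int × Int) × Int) × Int)) (t : List (((Int × Int) × Int) × Int))
    (c : (Int × Int) × Int) : pvFind (q :: t) c = if q.1 = c then some q.2 else pvFind t c := rfl

lemma pv_find_eq_none (bl : List (((Int × Int) × Int) × Int)) (c : (Int × Int) × Int)
    (h : ∀ q ∈ bl, q.1 ≠ c) : pvFind bl c = none := by
  induction bl with
  | nil => rfl
  | cons q t ih =>
    rw [pv_find_cons, if_neg (h q (List.mem_cons_self)),
      ih (fun q' hq' => h q' (List.mem_cons_of_mem _ hq'))]

lemma pv_find_of_mem (bl : List (((Int × Int) × Int) × Int)) (c : (Int × Int) × Int) (v : Int)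
    (hnd : (bl.map (fun q => q.1)).Nodup) (hm : (c, v) ∈ bl) : pvFind bl c = some v := by
  induction bl with
  | nil => cases hm
  | cons q t ih =>
    rcases List.mem_cons.1 hm with he | ht
    · rw [pv_find_cons, ← he]
      simp
    · have hq : q.1 ≠ c := by
        intro hqc
        have hc : c ∈ t.map (fun q => q.1) := List.mem_map_of_mem (f := fun q => q.1) ht
        simp only [List.map_cons, List.nodup_cons] at hnd
        exact hnd.1 (hqc ▸ hc)
      rw [pv_find_cons, if_neg hq]
      exact ih (by simp only [List.map_cons, List.nodup_cons] at hnd; exact hnd.2) ht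

-- lookup in the sorted list IS the flat dict lookup
lemma pv_find_sorted (Fb : PySem.Dict ((Int × Int) × Int) Int) (h : Fb.keys.Nodup)
    (c : (Int × Int) × Int) :
    pvFind (PySem.List.sorted Fb.items (fun q => pvLexKey q.1) false) c = Fb.get? c := by
  set bl := PySem.List.sorted Fb.items (fun q => pvLexKey q.1) false with hbl
  have hperm : bl.Perm Fb.items := PySem.List.sorted_perm _ _ _
  have hnd : (bl.map (fun q => q.1)).Nodup := (hperm.map _).nodup_iff.2 h
  cases hg : Fb.get? c with
  | some v =>
    exact pv_find_of_mem bl c v hnd (hperm.mem_iff.2 (PySem.Dict.mem_items_of_get?_eq_some Fb hg))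
  | none =>
    apply pv_find_eq_none
    intro q hq hqc
    have hk : q.1 ∈ Fb.keys := PySem.Dict.mem_keys_of_mem_items Fb (hperm.mem_iff.1 hq)
    rw [hqc] at hk
    exact ((PySem.Dict.get?_eq_none_iff_not_mem_keys _ _).1 hg) hk

-- the sorted item lists are strictly increasing on the composite key
lemma pv_sorted_strict (Fd : PySem.Dict ((Int × Int) × Int) Int) (h : Fd.keys.Nodup) :
    (PySem.List.sorted Fd.items (fun q => pvLexKey q.1) false).Pairwise
      (fun a b => pvLexKey a.1 < pvLexKey b.1) := by
  set bl := PySem.List.sorted Fd.items (fun q => pvLexKey q.1) false with hbl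
  have hle : bl.Pairwise (fun a b => pvLexKey a.1 ≤ pvLexKey b.1) :=
    PySem.List.sorted_pairwise _ _
  have hperm : bl.Perm Fd.items := PySem.List.sorted_perm _ _ _
  have hnd : (bl.map (fun q => q.1)).Nodup := (hperm.map _).nodup_iff.2 h
  have hne : bl.Pairwise (fun a b => a.1 ≠ b.1) := (List.pairwise_map.1 hnd)
  have hand := hle.and hne
  exact hand.imp (fun ⟨h1, h2⟩ => lt_of_le_of_ne h1 (fun he => h2 (pvLexKey_injective he)))

-- the merge loop never adds keys (every touched key is already present)
lemma pv_merge_keys : ∀ (n : Nat) (al bl : List (((Int × Int) × Int) × Int))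
    (r : PySem.Dict (Int × Int) Int), al.length + bl.length ≤ n →
    (∀ q ∈ al, r.contains q.1.1 = true) →
    (pvMergeLoop al bl r).keys = r.keys := by
  intro n
  induction n with
  | zero =>
    intro al bl r hlen _
    have hal : al = [] := List.eq_nil_of_length_eq_zero (by omega)
    subst hal
    cases bl <;> simp [pvMergeLoop]
  | succ n ih =>
    intro al bl r hlen hr
    match al, bl with
    | [], bl => cases bl <;> simp [pvMergeLoop]
    | (ca, va) :: ta, [] => simp [pvMergeLoop]
    | (ca, va) :: ta, (cb, vb) :: tb =>
      rw [pvMergeLoop]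
      by_cases h1 : pvLexKey ca < pvLexKey cb
      · rw [if_pos h1]
        exact ih ta ((cb, vb) :: tb) r (by simp only [List.length_cons] at hlen ⊢; omega)
          (fun q hq => hr q (List.mem_cons_of_mem _ hq))
      · rw [if_neg h1]
        by_cases h2 : pvLexKey cb < pvLexKey ca
        · rw [if_pos h2]
          exact ih ((ca, va) :: ta) tb r (by simp only [List.length_cons] at hlen ⊢; omega) hr
        · rw [if_neg h2]
          have hcc : r.contains ca.1 = true := hr (ca, va) (List.mem_cons_self)
          have hkm : (r.modify ca.1 0 (fun t => t + va * vb)).keys = r.keys := by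
            rw [PySem.Dict.keys_modify, PySem.Dict.keys_insert_of_contains _ _ hcc]
          rw [ih ta tb _ (by simp only [List.length_cons] at hlen ⊢; omega) ?_, hkm]
          intro q hq
          rw [PySem.Dict.contains_modify]
          simp [hr q (List.mem_cons_of_mem _ hq)]

-- the contribution of one tag-A entry, as the merge realises it
def pvTerm (bl : List (((Int × Int) × Int) × Int)) (K : Int × Int)
    (q : ((Int × Int) × Int) × Int) : Int :=
  if q.1.1 == K then (match pvFind bl q.1 with | some w => q.2 * w | none => 0) else 0

lemma pvTerm_congr (bl bl' : List (((Int × Int) × Int) × Int)) (K : Int × Int)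
    (q : ((Int × Int) × Int) × Int) (h : pvFind bl q.1 = pvFind bl' q.1) :
    pvTerm bl K q = pvTerm bl' K q := by
  simp only [pvTerm, h]

-- value of the merge loop at one key: the sum of matched products for that key
lemma pv_merge_getD (K : Int × Int) : ∀ (n : Nat) (al bl : List (((Int × Int) × Int) × Int))
    (r : PySem.Dict (Int × Int) Int), al.length + bl.length ≤ n →
    al.Pairwise (fun a b => pvLexKey a.1 < pvLexKey b.1) →
    bl.Pairwise (fun a b => pvLexKey a.1 < pvLexKey b.1) →
    (pvMergeLoop al bl r).getD K 0 = r.getD K 0 + (al.map (pvTerm bl K)).sum := by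
  intro n
  induction n with
  | zero =>
    intro al bl r hlen _ _
    have hal : al = [] := List.eq_nil_of_length_eq_zero (by omega)
    subst hal
    cases bl <;> simp [pvMergeLoop]
  | succ n ih =>
    intro al bl r hlen ha hb
    match al, bl with
    | [], bl => cases bl <;> simp [pvMergeLoop]
    | (ca, va) :: ta, [] =>
      have hz : ∀ q ∈ (ca, va) :: ta, pvTerm [] K q = 0 := by
        intro q _
        simp [pvTerm, pvFind]
      rw [List.map_congr_left hz]
      simp [pvMergeLoop]
    | (ca, va) :: ta, (cb, vb) :: tb =>
      have hamin : ∀ q ∈ ta, pvLexKey ca < pvLexKey q.1 :=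
        fun q hq => (List.pairwise_cons.1 ha).1 q hq
      have hbmin : ∀ q ∈ tb, pvLexKey cb < pvLexKey q.1 :=
        fun q hq => (List.pairwise_cons.1 hb).1 q hq
      rw [pvMergeLoop]
      by_cases h1 : pvLexKey ca < pvLexKey cb
      · rw [if_pos h1]
        rw [ih ta ((cb, vb) :: tb) r (by simp only [List.length_cons] at hlen ⊢; omega)
          (List.pairwise_cons.1 ha).2 hb]
        have hnone : pvFind ((cb, vb) :: tb) ca = none := by
          apply pv_find_eq_none
          intro q hq
          rcases List.mem_cons.1 hq with he | ht
          · rw [he]; exact pv_ne_of_key_lt h1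
          · exact pv_ne_of_key_lt (h1.trans (hbmin q ht))
        have hhead : pvTerm ((cb, vb) :: tb) K (ca, va) = 0 := by
          simp [pvTerm, hnone]
        simp only [List.map_cons, List.sum_cons, hhead, zero_add]
      · rw [if_neg h1]
        by_cases h2 : pvLexKey cb < pvLexKey ca
        · rw [if_pos h2]
          rw [ih ((ca, va) :: ta) tb r (by simp only [List.length_cons] at hlen ⊢; omega) ha
            (List.pairwise_cons.1 hb).2]
          have hcg : ∀ q ∈ (ca, va) :: ta, pvTerm tb K q = pvTerm ((cb, vb) :: tb) K q := by
            intro q hq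
            apply (pvTerm_congr _ _ _ _ _).symm
            rw [pv_find_cons, if_neg ?_]
            rcases List.mem_cons.1 hq with he | ht
            · rw [he]
              show ¬ (cb = ca)
              exact fun hcq => pv_ne_of_key_lt h2 hcq.symm
            · show ¬ (cb = q.1)
              exact fun hcq => pv_ne_of_key_lt (h2.trans (hamin q ht)) hcq.symm
          rw [List.map_congr_left hcg]
        · rw [if_neg h2]
          have hcacb : ca = cb := pvLexKey_injective (le_antisymm (not_lt.1 h2) (not_lt.1 h1))
          rw [ih ta tb _ (by simp only [List.length_cons] at hlen ⊢; omega)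
            (List.pairwise_cons.1 ha).2 (List.pairwise_cons.1 hb).2]
          have hfhead : pvFind ((cb, vb) :: tb) ca = some vb := by
            rw [pv_find_cons, if_pos hcacb.symm]
          have htail : ∀ q ∈ ta, pvTerm ((cb, vb) :: tb) K q = pvTerm tb K q := by
            intro q hq
            apply pvTerm_congr
            rw [pv_find_cons, if_neg ?_]
            show ¬ (cb = q.1)
            exact fun hcq => pv_ne_of_key_lt ((hcacb ▸ hamin q hq : pvLexKey cb < pvLexKey q.1)) hcq.symm
          rw [PySem.Dict.getD_modify]
          simp only [List.map_cons, List.sum_cons, List.map_congr_left htail]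
          have hhead : pvTerm ((cb, vb) :: tb) K (ca, va)
              = if ca.1 == K then va * vb else 0 := by
            simp [pvTerm, hfhead]
          rw [hhead]
          by_cases hK : K = ca.1
          · rw [if_pos hK, if_pos (by simp [hK])]
            rw [hK]
            ring
          · rw [if_neg hK, if_neg (by simpa using fun he => hK he.symm)]
            simp

-- the 'if key not in result: result[key] = 0' pass equals the unconditional insert-0 pass
lemma pv_init_eq : ∀ (l : List (Int × Int)) (d : PySem.Dict (Int × Int) Int),
    d.keys.Nodup → (∀ p ∈ d.items, p.2 = (0 : Int)) →
    l.foldl (fun r k => if r.contains k then r else r.insert k 0) d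
      = l.foldl (fun r k => r.insert k 0) d := by
  intro l
  induction l with
  | nil => intro d _ _; rfl
  | cons k t ih =>
    intro d hnd h0
    simp only [List.foldl_cons]
    by_cases hc : d.contains k = true
    · rw [if_pos hc]
      have hins : d.insert k 0 = d := by
        apply PySem.Dict.ext
        rw [PySem.Dict.items_insert_of_contains _ _ hc]
        have hid : ∀ p ∈ d.items, (if p.1 == k then (k, (0 : Int)) else p) = p := by
          intro p hp
          by_cases hpk : (p.1 == k) = true
          · have hp1 : p.1 = k := by simpa using hpk
            have hv : p.2 = 0 := h0 p hp
            rw [if_pos hpk]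
            exact Prod.ext_iff.2 ⟨hp1.symm, hv.symm⟩
          · rw [if_neg hpk]
        rw [List.map_congr_left hid]
        exact List.map_id _
      rw [hins]
      exact ih d hnd h0
    · rw [if_neg (by simpa using hc)]
      apply ih
      · exact PySem.Dict.nodup_keys_insert _ _ _ hnd
      · intro p hp
        rw [PySem.Dict.items_insert_of_not_contains _ _ (by simpa using hc)] at hp
        rcases List.mem_append.1 hp with h | h
        · exact h0 p h
        · simp only [List.mem_singleton] at h
          rw [h]

lemma pv_insert0_getD : ∀ (l : List (Int × Int)) (d : PySem.Dict (Int × Int) Int),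
    (∀ K, d.getD K 0 = 0) → ∀ K, (l.foldl (fun r k => r.insert k 0) d).getD K 0 = 0 := by
  intro l
  induction l with
  | nil => intro d h K; exact h K
  | cons k t ih =>
    intro d h K
    simp only [List.foldl_cons]
    apply ih
    intro K'
    rw [PySem.Dict.getD_insert]
    by_cases hK : K' = k <;> simp [hK, h K']

-- the merge-side summand is the flat hash-join summand
lemma pv_term_eq (Fb : PySem.Dict ((Int × Int) × Int) Int) (hnd : Fb.keys.Nodup)
    (K : Int × Int) (q : ((Int × Int) × Int) × Int) :
    pvTerm (PySem.List.sorted Fb.items (fun q => pvLexKey q.1) false) K q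
      = if Fb.contains q.1 && q.1.1 == K then q.2 * Fb.getD q.1 0 else 0 := by
  unfold pvTerm
  rw [pv_find_sorted Fb hnd q.1]
  cases hg : Fb.get? q.1 with
  | none =>
    have hc : Fb.contains q.1 = false := by
      rw [PySem.Dict.contains_eq_isSome_get?, hg]; rfl
    simp [hc]
  | some v =>
    have hc : Fb.contains q.1 = true := by
      rw [PySem.Dict.contains_eq_isSome_get?, hg]; rfl
    have hgd : Fb.getD q.1 0 = v := by
      rw [PySem.Dict.getD_eq_get?_getD, hg]; rfl
    by_cases hK : (q.1.1 == K) = true <;> simp [hc, hgd, hK]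

lemma pv_main (mapped : List ((Int × Int) × (String × Int × Int))) :
    reducer_matrix mapped = reducer_matrix_alt mapped := by
  have hpair : (fun (ab : PySem.Dict Int Int × PySem.Dict Int Int) (v : String × Int × Int) =>
      if v.1 == "A" then (ab.1.insert v.2.1 v.2.2, ab.2)
      else if v.1 == "B" then (ab.1, ab.2.insert v.2.1 v.2.2)
      else ab) = (fun ab v => (pvPA ab.1 v, pvPB ab.2 v)) := by
    funext ab v
    unfold pvPA pvPB
    by_cases h1 : (v.1 == "A") = true <;> by_cases h2 : (v.1 == "B") = true <;> simp_all
  have htriple : (fun (st : PySem.Dict (Int × Int) Int × PySem.Dict ((Int × Int) × Int) Int × PySem.Dict ((Int × Int) × Int) Int) (p : (Int × Int) × (String × Int × Int)) =>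
      let r := if st.1.contains p.1 then st.1 else st.1.insert p.1 0
      if p.2.1 == "A" then (r, st.2.1.insert (p.1, p.2.2.1) p.2.2.2, st.2.2)
      else if p.2.1 == "B" then (r, st.2.1, st.2.2.insert (p.1, p.2.2.1) p.2.2.2)
      else (r, st.2.1, st.2.2))
      = (fun st p => (pvStK st.1 p, pvStA st.2.1 p, pvStB st.2.2 p)) := by
    funext st p
    unfold pvStK pvStA pvStB
    by_cases h1 : (p.2.1 == "A") = true <;> by_cases h2 : (p.2.1 == "B") = true <;> simp_all
  have hsplit3 : mapped.foldl (fun st p => (pvStK st.1 p, pvStA st.2.1 p, pvStB st.2.2 p))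
      (PySem.Dict.empty, PySem.Dict.empty, PySem.Dict.empty)
      = (mapped.foldl pvStK PySem.Dict.empty, mapped.foldl pvStA PySem.Dict.empty,
         mapped.foldl pvStB PySem.Dict.empty) := by
    rw [PySem.List.foldl_prod_mk pvStK (fun s e => (pvStA s.1 e, pvStB s.2 e)) mapped
        PySem.Dict.empty (PySem.Dict.empty, PySem.Dict.empty),
      PySem.List.foldl_prod_mk]
  have pvTotal_eq : ∀ vs : List (String × Int × Int),
      (vs.foldl pvPA PySem.Dict.empty).keys.foldl
        (fun t k => if (vs.foldl pvPB PySem.Dict.empty).contains k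
          then t + (vs.foldl pvPA PySem.Dict.empty).getD k 0 * (vs.foldl pvPB PySem.Dict.empty).getD k 0
          else t) 0 = pvTotal vs := fun _ => rfl
  simp only [reducer_matrix, reducer_matrix_alt, hpair, htriple, PySem.List.foldl_prod_mk,
    hsplit3, pvTotal_eq]
  apply congrArg
  set grouped := List.foldl (fun g p => g.modify p.1 [] fun vs => vs ++ [p.2]) PySem.Dict.empty mapped with hgrouped
  set Fa := List.foldl pvStA PySem.Dict.empty mapped with hFa
  set Fb := List.foldl pvStB PySem.Dict.empty mapped with hFb
  set IK := (mapped.map (fun p => p.1)).foldl (fun r k => r.insert k (0 : Int)) PySem.Dict.empty with hIK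
  have hFkIK : List.foldl pvStK PySem.Dict.empty mapped = IK := by
    rw [hIK]
    rw [show List.foldl pvStK PySem.Dict.empty mapped
        = List.foldl (fun (r : PySem.Dict (Int × Int) Int) (k : Int × Int) =>
            if r.contains k then r else r.insert k (0 : Int)) PySem.Dict.empty
            (mapped.map (fun p => p.1)) from by rw [List.foldl_map]; rfl]
    exact pv_init_eq _ _ (by simp [PySem.Dict.empty]) (by simp [PySem.Dict.empty])
  rw [hFkIK]
  set alist := PySem.List.sorted Fa.items (fun q => pvLexKey q.1) false with halist
  set blist := PySem.List.sorted Fb.items (fun q => pvLexKey q.1) false with hblist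
  have hFa_nd : Fa.keys.Nodup := pv_nodup_stA mapped PySem.Dict.empty (by simp [PySem.Dict.empty])
  have hFb_nd : Fb.keys.Nodup := pv_nodup_stB mapped PySem.Dict.empty (by simp [PySem.Dict.empty])
  have ha : alist.Pairwise (fun a b => pvLexKey a.1 < pvLexKey b.1) := pv_sorted_strict Fa hFa_nd
  have hb : blist.Pairwise (fun a b => pvLexKey a.1 < pvLexKey b.1) := pv_sorted_strict Fb hFb_nd
  have hG_keys : grouped.keys = PySem.Set.update [] (mapped.map (fun p => p.1)) := by
    simpa using PySem.Dict.keys_foldl_modify_key mapped (fun p => p.1) []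
      (fun _ p => fun vs => vs ++ [p.2]) PySem.Dict.empty
  have hG_nodup : grouped.keys.Nodup :=
    PySem.Dict.nodup_keys_foldl_modify_key mapped (fun p => p.1) []
      (fun _ p => fun vs => vs ++ [p.2]) PySem.Dict.empty (by simp)
  have hIK_keys : IK.keys = PySem.Set.update [] (mapped.map (fun p => p.1)) := by
    simpa using PySem.Dict.keys_foldl_insert (mapped.map (fun p => p.1))
      (fun _ _ => (0 : Int)) PySem.Dict.empty
  have hIK_nodup : IK.keys.Nodup :=
    PySem.Dict.nodup_keys_foldl_insert (mapped.map (fun p => p.1))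
      (fun _ _ => (0 : Int)) PySem.Dict.empty (by simp)
  have hIK_getD : ∀ K, IK.getD K 0 = 0 :=
    pv_insert0_getD (mapped.map (fun p => p.1)) PySem.Dict.empty (fun K => by simp)
  have hkeq : grouped.keys = IK.keys := by rw [hG_keys, hIK_keys]
  have hsub : ∀ q ∈ alist, IK.contains q.1.1 = true := by
    intro q hq
    have hq' : q ∈ Fa.items := (PySem.List.mem_sorted _ _ _ _).1 hq
    have hk : q.1 ∈ Fa.keys := PySem.Dict.mem_keys_of_mem_items Fa hq'
    rcases pv_stA_keys_sub mapped PySem.Dict.empty q.1 hk with h | h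
    · rw [PySem.Dict.keys_empty] at h; cases h
    · rw [PySem.Dict.contains_iff_mem_keys, hIK_keys, PySem.Set.update_nil_left]
      exact (PySem.Set.mem_ofList _ _).2 h
  set RM := pvMergeLoop alist blist IK with hRM
  have hRM_keys : RM.keys = IK.keys :=
    pv_merge_keys (alist.length + blist.length) alist blist IK le_rfl hsub
  have hRM_nodup : RM.keys.Nodup := by rw [hRM_keys]; exact hIK_nodup
  have hRMitems : RM.items = RM.keys.map (fun K => (K, RM.getD K 0)) :=
    PySem.Dict.items_eq_map_keys RM hRM_nodup 0
  have hRM_getD : ∀ K, RM.getD K 0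
      = pvTotal ((mapped.filter (fun p => p.1 == K)).map (fun p => p.2)) := by
    intro K
    rw [hRM, pv_merge_getD K (alist.length + blist.length) alist blist IK le_rfl ha hb,
      hIK_getD K, zero_add]
    have hsum1 : (alist.map (pvTerm blist K)).sum = (Fa.items.map (pvTerm blist K)).sum :=
      ((PySem.List.sorted_perm _ _ _).map _).sum_eq
    have hsum2 : Fa.items.map (pvTerm blist K)
        = Fa.items.map (fun q => if Fb.contains q.1 && q.1.1 == K
            then q.2 * Fb.getD q.1 0 else 0) :=
      List.map_congr_left (fun q _ => pv_term_eq Fb hFb_nd K q)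
    rw [hsum1, hsum2, ← pv_key_total mapped K]
  -- A's result dictionary
  have hAitems : (List.foldl (fun r kv => r.insert kv.1 (pvTotal kv.2)) PySem.Dict.empty grouped.items).items
      = grouped.items.map (fun kv => (kv.1, pvTotal kv.2)) := by
    simpa using PySem.Dict.items_foldl_insert_fresh grouped.items (fun kv => kv.1)
      (fun kv => pvTotal kv.2) PySem.Dict.empty (by intro a _; simp) (by simpa using hG_nodup)
  have hGitems : grouped.items = grouped.keys.map (fun K => (K, grouped.getD K [])) :=
    PySem.Dict.items_eq_map_keys grouped hG_nodup []
  rw [hAitems, hGitems, List.map_map, hRMitems, hRM_keys, ← hkeq]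
  apply List.map_congr_left
  intro K hKm
  simp only [Function.comp]
  apply congrArg (Prod.mk K)
  have hgd : grouped.getD K [] = (mapped.filter (fun p => p.1 == K)).map (fun p => p.2) := by
    simpa using PySem.Dict.getD_foldl_modify_append mapped PySem.Dict.empty K
  rw [hgd, hRM_getD K]

-- ===== VERDICT (by name: the statement is the Claim_ definition above) =====
theorem reducer_matrix_spec : Claim_equal_reducer_matrix := by
  intro mapped _
  unfold Spec_reducer_matrix
  exact pv_main mapped
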